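-- pv_equiv track=rewrite | github.com/adcosta17/Retrotransposon-insert-detection | scripts/get_assembly_gaps.py | get_nearby
-- ===== SOURCE A (Python) =====
-- def get_nearby(chrom, start, end, seen):
--     i = start
--     count = 0
--     nearby = {}
--     if chrom not in seen:
--         return nearby
--     while i < end:
--         if i in seen[chrom]:
--             nearby[count] = seen[chrom][i]
--             count += 1
--         i += 1
--     return nearby
-- ===== SOURCE B (Python) =====
-- def get_nearby(chrom, start, end, seen):
--     if chrom not in seen:
--         return {}
--     d = seen[chrom]
--     ks = sorted(k for k in d if start <= k < end)
--     return dict(enumerate(d[k] for k in ks))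
-- ===== Notes on version B (the rewrite author's own statement) =====
-- stated objective: alternative
-- what changed: Instead of scanning every integer i in [start,end) and testing dict membership, B filters the dict's own keys to the range, sorts them, and enumerates their values.
import Mathlib
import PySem

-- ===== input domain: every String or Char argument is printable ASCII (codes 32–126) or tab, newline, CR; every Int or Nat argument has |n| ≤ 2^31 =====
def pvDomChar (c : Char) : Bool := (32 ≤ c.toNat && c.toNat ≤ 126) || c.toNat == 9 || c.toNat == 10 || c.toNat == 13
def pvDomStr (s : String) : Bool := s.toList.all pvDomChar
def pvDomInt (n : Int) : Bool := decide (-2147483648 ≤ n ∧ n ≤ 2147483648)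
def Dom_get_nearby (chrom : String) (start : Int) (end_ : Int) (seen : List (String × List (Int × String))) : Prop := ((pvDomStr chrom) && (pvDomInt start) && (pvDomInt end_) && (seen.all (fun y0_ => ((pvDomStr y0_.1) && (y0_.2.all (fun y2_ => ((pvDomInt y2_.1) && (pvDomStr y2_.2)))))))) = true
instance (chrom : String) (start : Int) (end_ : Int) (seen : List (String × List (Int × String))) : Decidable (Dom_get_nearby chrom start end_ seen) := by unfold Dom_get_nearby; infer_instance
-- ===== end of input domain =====

-- B replaces A's scan over every integer in [start,end) by filtering and sorting the dict's own keys that lie in the range (an alternative algorithm over the keys instead of the range).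


-- ===== PORT A =====
-- first-match association-list lookup (the dict convention: lookup = first match)
def alGet? {κ α : Type} [DecidableEq κ] (l : List (κ × α)) (k : κ) : Option α :=
  match l with
  | [] => none
  | (k', v) :: t => if k' = k then some v else alGet? t k

-- loop body of A: 'if i in d: nearby[count] = d[i]; count += 1' on the state (count, nearby)
def stepA (d : List (Int × String)) (st : Int × List (Int × String)) (i : Int) : Int × List (Int × String) :=
  match alGet? d i with
  | some v => (st.1 + 1, st.2 ++ [(st.1, v)])
  | none => st

def get_nearby (chrom : String) (start : Int) (end_ : Int) (seen : List (String × List (Int × String))) : List (Int × String) :=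
  match alGet? seen chrom with
  | none => []
  | some d => ((PySem.List.pyRange start end_ 1).foldl (stepA d) (0, [])).2

-- ===== PORT B =====
def get_nearby_alt (chrom : String) (start : Int) (end_ : Int) (seen : List (String × List (Int × String))) : List (Int × String) :=
  match alGet? seen chrom with
  | none => []
  | some d =>
    -- 'k for k in d' iterates the dict's (distinct) keys: dedup of the key column
    let ks := PySem.List.sorted
      ((PySem.List.dedup (d.map (·.1))).filter (fun k => start ≤ k && k < end_))
      (fun x => x) false
    -- d[k] always succeeds (k is a key of d): the getD default is never used
    PySem.List.enumerate (ks.map (fun k => (alGet? d k).getD ""))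

-- ===== PRECONDITION & SPEC =====
def Spec_get_nearby (chrom : String) (start : Int) (end_ : Int) (seen : List (String × List (Int × String))) (out : List (Int × String)) : Prop := out = get_nearby_alt chrom start end_ seen
instance (chrom : String) (start : Int) (end_ : Int) (seen : List (String × List (Int × String))) (out : List (Int × String)) : Decidable (Spec_get_nearby chrom start end_ seen out) := by unfold Spec_get_nearby; infer_instance

-- ===== CLAIM (what is proved, stated in full; the proofs are below) =====
def Claim_equal_get_nearby : Prop := ∀ (chrom : String) (start : Int) (end_ : Int) (seen : List (String × List (Int × String))), Dom_get_nearby chrom start end_ seen → Spec_get_nearby chrom start end_ seen (get_nearby chrom start end_ seen)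

-- ===== LEMMAS AND PROOFS =====

theorem alGet?_isSome_iff {α : Type} (d : List (Int × α)) (i : Int) :
    (alGet? d i).isSome = true ↔ i ∈ d.map (·.1) := by
  induction d with
  | nil => simp [alGet?]
  | cons p t ih =>
    obtain ⟨k, v⟩ := p
    by_cases h : k = i
    · subst h; simp [alGet?]
    · simp only [alGet?, if_neg h, ih, List.map_cons, List.mem_cons]
      constructor
      · exact Or.inr
      · rintro (rfl | hm)
        · exact absurd rfl h
        · exact hm

theorem loopA (d : List (Int × String)) (l : List Int) (n : Int) (acc : List (Int × String)) :
    (l.foldl (stepA d) (n, acc)).2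
      = acc ++ PySem.List.enumerate (l.filterMap (alGet? d)) n := by
  induction l generalizing n acc with
  | nil => simp
  | cons i t ih =>
    cases h : alGet? d i with
    | none => simp [List.foldl_cons, stepA, h, ih]
    | some v => simp [List.foldl_cons, stepA, h, ih, PySem.List.enumerate_cons]

theorem filterMap_eq_map_filter_getD {α : Type} (f : Int → Option α) (dflt : α) (l : List Int) :
    l.filterMap f = (l.filter (fun i => (f i).isSome)).map (fun k => (f k).getD dflt) := by
  induction l with
  | nil => rfl
  | cons i t ih =>
    cases h : f i with
    | none => simp [h, ih]
    | some v => simp [h, ih]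

theorem keys_eq {α : Type} (d : List (Int × α)) (start end_ : Int) :
    PySem.List.sorted
        ((PySem.List.dedup (d.map (·.1))).filter (fun k => start ≤ k && k < end_))
        (fun x => x) false
      = (PySem.List.pyRange start end_ 1).filter (fun i => (alGet? d i).isSome) := by
  apply PySem.List.sorted_eq_of_perm_of_pairwise_lt
  · rw [List.perm_ext_iff_of_nodup]
    · intro a
      simp [PySem.List.mem_pyRange_one, alGet?_isSome_iff]
      tauto
    · exact (PySem.List.nodup_pyRange_one start end_).filter _
    · exact (PySem.List.nodup_dedup _).filter _
  · exact (PySem.List.pairwise_lt_pyRange_one start end_).filter _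

theorem get_nearby_eq (chrom : String) (start end_ : Int) (seen : List (String × List (Int × String))) :
    get_nearby chrom start end_ seen = get_nearby_alt chrom start end_ seen := by
  unfold get_nearby get_nearby_alt
  cases h : alGet? seen chrom with
  | none => rfl
  | some d =>
    dsimp only
    rw [loopA d (PySem.List.pyRange start end_ 1) 0 [], List.nil_append,
      filterMap_eq_map_filter_getD (alGet? d) "", keys_eq]

-- ===== VERDICT (by name: the statement is the Claim_ definition above) =====
theorem get_nearby_spec : Claim_equal_get_nearby := by
  intro chrom start end_ seen _
  exact get_nearby_eq chrom start end_ seen
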